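-- pv_equiv track=rewrite | github.com/SamWilson22/Farkle | Farkle.py | possible_rolls
-- ===== SOURCE A (Python) =====
-- def possible_rolls(num_dice):
--     """
--     input:
--         dice - number of dice
--     output:
--         dice_rolls - ordered list lists.  all possible dice rolls
--             ^ ideally this shoud be handled as a set
--         frequency - ordered list of ints. frequency of each dice roll
--     """
--
--     # Nested for loop that is deeper depending value of input
--
--     dice_rolls = []
--     roll_frequencies = []
--
--     # one dice case
--     if num_dice == 1:
--         for i in range(6):
--             dice_rolls.append([i+1])
--             roll_frequencies.append(1)
--         pass
--
--     # two dice case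
--     if num_dice == 2:
--         for i in range(6):
--             die1 = i+1
--             for j in range(6):
--                 die2 = j+1
--                 dice_roll = [die1,die2]
--                 dice_roll.sort()
--                 if dice_roll in dice_rolls:
--                     ind = dice_rolls.index(dice_roll)
--                     roll_frequencies[ind] = roll_frequencies[ind] + 1
--                 else:
--                     dice_rolls.append(dice_roll)
--                     roll_frequencies.append(1)
--
--     # how to generalize this to n dice case?
--     return (dice_rolls,roll_frequencies)
-- ===== SOURCE B (Python) =====
-- def possible_rolls(num_dice):
--     dice_rolls = []
--     frequencies = []
--     if num_dice == 1:
--         for d in range(1, 7):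
--             dice_rolls.append([d])
--             frequencies.append(1)
--     elif num_dice == 2:
--         for die1 in range(1, 7):
--             for die2 in range(die1, 7):
--                 dice_rolls.append([die1, die2])
--                 frequencies.append(1 if die1 == die2 else 2)
--     return (dice_rolls, frequencies)
-- ===== Notes on version B (the rewrite author's own statement) =====
-- stated objective: simpler
-- what changed: B generates each sorted pair exactly once (die2 from die1 upward) with the closed-form frequency 1 for doubles / 2 for mixed, instead of scanning all 36 ordered pairs with a membership test and list.index accumulation.
import Mathlib
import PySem

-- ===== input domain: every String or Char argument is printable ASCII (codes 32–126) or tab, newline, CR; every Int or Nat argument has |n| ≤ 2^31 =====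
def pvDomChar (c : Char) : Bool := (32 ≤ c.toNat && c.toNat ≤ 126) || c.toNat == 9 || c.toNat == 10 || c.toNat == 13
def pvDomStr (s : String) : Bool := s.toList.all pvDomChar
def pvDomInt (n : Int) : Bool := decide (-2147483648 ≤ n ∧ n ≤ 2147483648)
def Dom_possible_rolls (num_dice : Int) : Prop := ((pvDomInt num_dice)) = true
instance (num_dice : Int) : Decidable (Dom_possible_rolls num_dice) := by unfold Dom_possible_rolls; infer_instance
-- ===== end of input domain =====

set_option maxRecDepth 4000


-- B enumerates each sorted pair once with a closed-form frequency instead of A's 36-pair scan with membership/index accumulation (objective: simpler).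

-- ===== PORT A =====
def possible_rolls (num_dice : Int) : List (List Int) × List Int :=
  let st0 : List (List Int) × List Int := ([], [])
  -- one dice case
  let st1 :=
    if num_dice = 1 then
      (List.range 6).foldl (fun (st : List (List Int) × List Int) i =>
        (st.1 ++ [[(i : Int) + 1]], st.2 ++ [(1 : Int)])) st0
    else st0
  -- two dice case
  let st2 :=
    if num_dice = 2 then
      (List.range 6).foldl (fun st i =>
        (List.range 6).foldl (fun (st : List (List Int) × List Int) j =>
          let die1 : Int := (i : Int) + 1
          let die2 : Int := (j : Int) + 1
          let dice_roll := PySem.List.sorted [die1, die2] id false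
          if dice_roll ∈ st.1 then
            match PySem.List.index? st.1 dice_roll with
            | some ind => (st.1, st.2.set ind (st.2.getD ind 0 + 1))
            | none => st  -- unreachable: membership just held
          else
            (st.1 ++ [dice_roll], st.2 ++ [(1 : Int)])) st) st1
    else st1
  st2

-- ===== PORT B =====
def possible_rolls_alt (num_dice : Int) : List (List Int) × List Int :=
  if num_dice = 1 then
    (PySem.List.pyRange 1 7 1).foldl (fun (st : List (List Int) × List Int) d =>
      (st.1 ++ [[d]], st.2 ++ [(1 : Int)])) ([], [])
  else if num_dice = 2 then
    (PySem.List.pyRange 1 7 1).foldl (fun st die1 =>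
      (PySem.List.pyRange die1 7 1).foldl (fun (st : List (List Int) × List Int) die2 =>
        (st.1 ++ [[die1, die2]], st.2 ++ [if die1 = die2 then (1 : Int) else 2])) st) ([], [])
  else ([], [])

-- ===== PRECONDITION & SPEC =====
def Spec_possible_rolls (num_dice : Int) (out : List (List Int) × List Int) : Prop := out = possible_rolls_alt num_dice
instance (num_dice : Int) (out : List (List Int) × List Int) : Decidable (Spec_possible_rolls num_dice out) := by unfold Spec_possible_rolls; infer_instance

-- ===== CLAIM (what is proved, stated in full; the proofs are below) =====
def Claim_equal_possible_rolls : Prop := ∀ (num_dice : Int), Dom_possible_rolls num_dice → Spec_possible_rolls num_dice (possible_rolls num_dice)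

-- ===== LEMMAS AND PROOFS =====

-- ===== VERDICT (by name: the statement is the Claim_ definition above) =====
theorem possible_rolls_spec : Claim_equal_possible_rolls := by
  intro n _
  unfold Spec_possible_rolls
  by_cases h1 : n = 1
  · subst h1; decide
  · by_cases h2 : n = 2
    · subst h2; decide
    · simp [possible_rolls, possible_rolls_alt, h1, h2]
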